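-- pv_equiv track=rewrite | github.com/edenptblack/Genome-sequencing--BioInf-II- | genomes.py | deBruijnAdjacency
-- ===== SOURCE A (Python) =====
-- def StringComposition(Text, k):
--     substrings = []
--     n = len(Text)
--     for i in range(n-k+1):
--         substrings.append(Text[i:i+k])
--     return substrings
--
-- def deBruijnAdjacency(Text, k):
--     nodes = StringComposition(Text, k-1)
--     graph = {}
--
--     for i in range(len(nodes)):
--         if i + 1 >= len(nodes):  # Adjust the condition to avoid index out of range
--             break
--         elif nodes[i] not in graph:
--             graph[nodes[i]] = []
--             graph[nodes[i]].append(nodes[i + 1])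
--         elif nodes[i] in graph:
--             graph[nodes[i]].append(nodes[i + 1])
--
--     graph = dict(sorted(graph.items()))
--
--     return graph
-- ===== SOURCE B (Python) =====
-- def deBruijnAdjacency(Text, k):
--     nodes = [Text[i:i+k-1] for i in range(len(Text) - k + 2)]
--     items = []
--     for pre, suc in sorted(zip(nodes, nodes[1:]), key=lambda e: e[0]):
--         if items and items[-1][0] == pre:
--             items[-1][1].append(suc)
--         else:
--             items.append((pre, [suc]))
--     return dict(items)
-- ===== Notes on version B (the rewrite author's own statement) =====
-- stated objective: alternative
-- what changed: B drops A's dict-membership insertion loop: it zips adjacent (k-1)-mers into an edge list, stable-sorts the edges by source node, and groups consecutive equal-key runs in one pass (sort-then-group instead of hash-then-sort).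
import Mathlib
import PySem

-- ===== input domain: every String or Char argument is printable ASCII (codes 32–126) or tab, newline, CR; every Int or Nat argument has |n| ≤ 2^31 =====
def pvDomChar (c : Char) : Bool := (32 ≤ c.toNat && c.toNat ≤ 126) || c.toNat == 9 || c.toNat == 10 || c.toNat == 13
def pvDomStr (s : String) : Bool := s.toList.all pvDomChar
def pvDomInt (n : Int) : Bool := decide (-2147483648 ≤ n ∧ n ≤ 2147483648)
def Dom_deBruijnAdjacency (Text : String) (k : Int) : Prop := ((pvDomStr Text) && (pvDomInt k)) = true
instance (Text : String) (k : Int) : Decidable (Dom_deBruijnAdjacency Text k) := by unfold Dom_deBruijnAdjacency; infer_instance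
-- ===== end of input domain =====

-- B builds the adjacency list by stable-sorting the edge list and grouping consecutive runs,
-- instead of A's dict-membership insertion loop followed by a sort (objective: alternative).

-- ===== PORT A =====
def StringComposition (Text : String) (k : Int) : List String :=
  let n : Int := PySem.Str.len Text
  (PySem.List.pyRange 0 (n - k + 1) 1).foldl
    (fun substrings i => substrings ++ [PySem.Str.slice Text (some i) (some (i + k))]) []

def deBruijnLoopA (nodes : List String) : List Int → PySem.Dict String (List String) → PySem.Dict String (List String)
  | [], graph => graph
  | i :: rest, graph =>
    if i + 1 ≥ (nodes.length : Int) then graph   -- break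
    else
      let key := PySem.List.pyGetD nodes i ""
      let nxt := PySem.List.pyGetD nodes (i + 1) ""
      if (PySem.Dict.contains graph key) = false then
        deBruijnLoopA nodes rest ((graph.insert key []).modify key [] (fun l => l ++ [nxt]))
      else if PySem.Dict.contains graph key then
        deBruijnLoopA nodes rest (graph.modify key [] (fun l => l ++ [nxt]))
      else
        deBruijnLoopA nodes rest graph

def deBruijnAdjacency (Text : String) (k : Int) : List (String × List String) :=
  let nodes := StringComposition Text (k - 1)
  let graph := deBruijnLoopA nodes (PySem.List.pyRange 0 (nodes.length : Int) 1) PySem.Dict.empty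
  -- sorted(graph.items()): keys are unique, so Python's tuple sort is the key sort
  PySem.List.sorted graph.items (fun p => p.1) false

-- ===== PORT B =====
-- the run-grouping step of B's loop body (items[-1][1].append vs a new run)
def bStep (items : List (String × List String)) (e : String × String) : List (String × List String) :=
  match items.getLast? with
  | some last =>
      if last.1 == e.1 then items.dropLast ++ [(last.1, last.2 ++ [e.2])]
      else items ++ [(e.1, [e.2])]
  | none => items ++ [(e.1, [e.2])]

def deBruijnAdjacency_alt (Text : String) (k : Int) : List (String × List String) :=
  let nodes := (PySem.List.pyRange 0 (PySem.Str.len Text - k + 2) 1).map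
      (fun i => PySem.Str.slice Text (some i) (some (i + k - 1)))
  let edges := PySem.List.sorted (nodes.zip (PySem.List.slice nodes (some 1) none)) (fun e => e.1) false
  (PySem.Dict.ofList (edges.foldl bStep [])).items

-- ===== PRECONDITION & SPEC =====
def Spec_deBruijnAdjacency (Text : String) (k : Int) (out : List (String × List String)) : Prop := out = deBruijnAdjacency_alt Text k
instance (Text : String) (k : Int) (out : List (String × List String)) : Decidable (Spec_deBruijnAdjacency Text k out) := by unfold Spec_deBruijnAdjacency; infer_instance

-- ===== CLAIM (what is proved, stated in full; the proofs are below) =====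
def Claim_equal_deBruijnAdjacency : Prop := ∀ (Text : String) (k : Int), Dom_deBruijnAdjacency Text k → Spec_deBruijnAdjacency Text k (deBruijnAdjacency Text k)

-- ===== LEMMAS AND PROOFS =====

-- the per-edge dict step both of A's branches amount to
def stepD (g : PySem.Dict String (List String)) (e : String × String) : PySem.Dict String (List String) :=
  g.modify e.1 [] (fun l => l ++ [e.2])

-- first-occurrence-ordered distinct source nodes of an edge list
def keysOf (E : List (String × String)) : List String := PySem.List.dedup (E.map Prod.fst)
-- successors of x, in edge order
def valsOf (E : List (String × String)) (x : String) : List String :=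
  (E.filter (fun e => e.1 == x)).map Prod.snd
def groupOf (E : List (String × String)) : List (String × List String) :=
  (keysOf E).map (fun x => (x, valsOf E x))

lemma insert_empty_modify (g : PySem.Dict String (List String)) (k : String)
    (f : List String → List String) (h : g.contains k = false) :
    (g.insert k []).modify k [] f = g.modify k [] f := by
  obtain ⟨items⟩ := g
  simp only [PySem.Dict.contains, List.any_eq_false] at h
  have h' : ∀ p ∈ items, (p.1 == k) = false := by
    intro p hp; simpa using h p hp
  have hfind : List.find? (fun p => p.1 == k) items = none := by
    rw [List.find?_eq_none]; intro p hp; simp [h' p hp]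
  have hany : (items.any fun p => p.1 == k) = false := by
    simp only [List.any_eq_false]; intro p hp; simp [h' p hp]
  simp only [PySem.Dict.modify, PySem.Dict.getD_insert_self]
  simp only [PySem.Dict.insert, PySem.Dict.contains, PySem.Dict.getD, PySem.Dict.get?,
    hany, hfind, Bool.false_eq_true, if_false, Option.map_none, Option.getD_none]
  have hany2 : ((items ++ [(k, ([] : List String))]).any (fun p => p.1 == k)) = true := by simp
  simp only [hany2, if_true, List.map_append]
  congr 1
  congr 1
  · conv_rhs => rw [← List.map_id items]
    apply List.map_congr_left; intro p hp
    simp [h' p hp]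
  · simp

lemma loopA_eq (nodes : List String) (n : Nat) : ∀ (j : Nat) (g : PySem.Dict String (List String)),
    nodes.length ≤ j + n →
    deBruijnLoopA nodes (PySem.List.pyRange (j : Int) (nodes.length : Int) 1) g
      = ((nodes.drop j).zip (nodes.drop j).tail).foldl stepD g := by
  induction n with
  | zero =>
    intro j g hle
    rw [PySem.List.pyRange_one_eq_nil (by exact_mod_cast (by omega : (nodes.length : Int) ≤ j))]
    rw [List.drop_eq_nil_of_le (by omega)]
    simp [deBruijnLoopA]
  | succ n ih =>
    intro j g hle
    by_cases hj : nodes.length ≤ j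
    · rw [PySem.List.pyRange_one_eq_nil (by exact_mod_cast hj)]
      rw [List.drop_eq_nil_of_le hj]
      simp [deBruijnLoopA]
    · push_neg at hj
      rw [PySem.List.pyRange_one_cons (by exact_mod_cast hj)]
      by_cases hj1 : j + 1 ≥ nodes.length
      · -- break: only one node left
        rw [deBruijnLoopA]
        rw [if_pos (by exact_mod_cast (by omega : (j : Int) + 1 ≥ (nodes.length : Int)))]
        have hdrop : (nodes.drop j).tail = [] := by
          have hlen : (nodes.drop j).tail.length = 0 := by
            simp only [List.length_tail, List.length_drop]; omega
          exact List.eq_nil_of_length_eq_zero hlen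
        rw [hdrop, List.zip_nil_right]
        rfl
      · push_neg at hj1
        rw [deBruijnLoopA]
        rw [if_neg (by push_neg; exact_mod_cast (by omega : (j : Int) + 1 < (nodes.length : Int)))]
        have hkey : PySem.List.pyGetD nodes (j : Int) "" = nodes[j] := by
          rw [PySem.List.pyGetD_natCast]; exact List.getD_eq_getElem _ _ hj
        have hnxt : PySem.List.pyGetD nodes ((j : Int) + 1) "" = nodes[j+1] := by
          rw [show ((j : Int) + 1) = ((j+1 : Nat) : Int) by push_cast; ring]
          rw [PySem.List.pyGetD_natCast]; exact List.getD_eq_getElem _ _ hj1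
        have hzip : (nodes.drop j).zip (nodes.drop j).tail
            = (nodes[j], nodes[j+1]) :: ((nodes.drop (j+1)).zip (nodes.drop (j+1)).tail) := by
          rw [List.drop_eq_getElem_cons hj]
          rw [List.tail_cons]
          rw [List.drop_eq_getElem_cons hj1]
          rfl
        rw [hzip]
        simp only [hkey, hnxt, List.foldl_cons]
        have hstep : ∀ g', deBruijnLoopA nodes (PySem.List.pyRange ((j:Int)+1) (nodes.length : Int) 1) g'
            = ((nodes.drop (j+1)).zip (nodes.drop (j+1)).tail).foldl stepD g' := by
          intro g'
          rw [show ((j : Int) + 1) = ((j+1 : Nat) : Int) by push_cast; ring]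
          exact ih (j+1) g' (by omega)
        by_cases hc : PySem.Dict.contains g nodes[j]
        · simp only [hc, Bool.true_eq_false, if_false, if_pos rfl, hstep]
          rfl
        · simp only [Bool.not_eq_true] at hc
          simp only [hc, if_pos rfl, hstep]
          rw [insert_empty_modify _ _ _ hc]
          rfl

lemma keysOf_mem (E : List (String × String)) (x : String) : x ∈ keysOf E ↔ x ∈ E.map Prod.fst := by
  unfold keysOf PySem.List.dedup
  exact PySem.Set.mem_ofList _ _

lemma keysOf_nodup (E : List (String × String)) : (keysOf E).Nodup :=
  PySem.Set.nodup_ofList _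

lemma keysOf_append (E : List (String × String)) (e : String × String) :
    keysOf (E ++ [e]) = if e.1 ∈ keysOf E then keysOf E else keysOf E ++ [e.1] := by
  have h1 : keysOf (E ++ [e]) = PySem.Set.add (keysOf E) e.1 := by
    unfold keysOf PySem.List.dedup PySem.Set.ofList
    rw [List.map_append, List.foldl_append]
    rfl
  rw [h1]
  unfold PySem.Set.add PySem.Set.contains
  by_cases h : e.1 ∈ keysOf E
  · rw [if_pos (by simpa [List.contains_iff_mem] using h), if_pos h]
  · rw [if_neg (by simpa [List.contains_iff_mem] using h), if_neg h]

lemma valsOf_append (E : List (String × String)) (e : String × String) (x : String) :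
    valsOf (E ++ [e]) x = valsOf E x ++ (if e.1 == x then [e.2] else []) := by
  unfold valsOf
  rw [List.filter_append, List.map_append]
  congr 1
  by_cases h : e.1 == x <;> simp [List.filter, h]

lemma valsOf_not_mem (E : List (String × String)) (x : String) (h : x ∉ keysOf E) :
    valsOf E x = [] := by
  rw [keysOf_mem] at h
  unfold valsOf
  rw [List.filter_eq_nil_iff.mpr, List.map_nil]
  intro e he
  simp only [beq_iff_eq]
  intro hx
  exact h (by simpa [hx] using List.mem_map_of_mem (f := Prod.fst) he)

lemma find?_groupOf (E : List (String × String)) (k : String) (h : k ∈ keysOf E) :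
    List.find? (fun p => p.1 == k) (groupOf E) = some (k, valsOf E k) := by
  unfold groupOf
  rw [List.find?_map]
  have : List.find? ((fun p => p.1 == k) ∘ fun x => (x, valsOf E x)) (keysOf E)
      = List.find? (fun x => x == k) (keysOf E) := by rfl
  rw [this]
  cases hf : List.find? (fun x => x == k) (keysOf E) with
  | none => exact absurd h (by simpa using List.find?_eq_none.mp hf k)
  | some y =>
    have := List.find?_some hf
    simp only [beq_iff_eq] at this
    subst this
    rfl

lemma contains_groupOf (E : List (String × String)) (d : PySem.Dict String (List String))
    (hd : d.items = groupOf E) (k : String) :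
    d.contains k = decide (k ∈ keysOf E) := by
  unfold PySem.Dict.contains
  rw [hd]
  unfold groupOf
  by_cases h : k ∈ keysOf E
  · simp only [h, decide_true, List.any_eq_true]
    exact ⟨(k, valsOf E k), List.mem_map_of_mem h, by simp⟩
  · simp only [h, decide_false, List.any_eq_false]
    intro p hp hbeq
    obtain ⟨x, hx, rfl⟩ := List.mem_map.mp hp
    have hxk : x = k := by simpa using hbeq
    exact h (hxk ▸ hx)

lemma foldD_items (E : List (String × String)) :
    (E.foldl stepD PySem.Dict.empty).items = groupOf E := by
  induction E using List.reverseRecOn with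
  | nil => simp [groupOf, keysOf, PySem.List.dedup, PySem.Set.ofList, PySem.Dict.empty, PySem.Set.empty]
  | append_singleton E e ih =>
    rw [List.foldl_append, List.foldl_cons, List.foldl_nil]
    set d := E.foldl stepD PySem.Dict.empty with hd
    show (stepD d e).items = groupOf (E ++ [e])
    unfold stepD PySem.Dict.modify
    by_cases hmem : e.1 ∈ keysOf E
    · -- existing key: insert overwrites in place
      have hget : d.getD e.1 [] = valsOf E e.1 := by
        unfold PySem.Dict.getD PySem.Dict.get?
        rw [ih, find?_groupOf E e.1 hmem]; rfl
      have hcont : d.contains e.1 = true := by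
        rw [contains_groupOf E d ih]; simpa using hmem
      unfold PySem.Dict.insert
      rw [hcont, if_pos rfl]
      show List.map _ d.items = _
      rw [ih, hget]
      unfold groupOf
      rw [keysOf_append, if_pos hmem, List.map_map]
      apply List.map_congr_left
      intro x hx
      by_cases hxk : x = e.1
      · subst hxk
        simp [valsOf_append]
      · have hne : e.1 ≠ x := fun h => hxk h.symm
        simp only [Function.comp_apply, beq_iff_eq]
        rw [if_neg hxk, valsOf_append]
        simp [beq_iff_eq, hne]
    · -- new key: appended at the end
      have hget : d.getD e.1 [] = [] := by
        unfold PySem.Dict.getD PySem.Dict.get?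
        rw [ih]
        have : List.find? (fun p => p.1 == e.1) (groupOf E) = none := by
          rw [List.find?_eq_none]
          rintro ⟨x, v⟩ hp
          obtain ⟨y, hy, hxy⟩ := List.mem_map.mp hp
          simp only [Prod.mk.injEq] at hxy
          simp only [beq_iff_eq]
          intro hc
          exact hmem (by rw [← hc, ← hxy.1]; exact hy)
        rw [this]; rfl
      have hcont : d.contains e.1 = false := by
        rw [contains_groupOf E d ih]; simpa using hmem
      unfold PySem.Dict.insert
      rw [hcont]
      simp only [Bool.false_eq_true, if_false]
      show d.items ++ [(e.1, d.getD e.1 [] ++ [e.2])] = _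
      rw [ih, hget]
      unfold groupOf
      rw [keysOf_append, if_neg hmem, List.map_append]
      congr 1
      · apply List.map_congr_left
        intro x hx
        rw [valsOf_append]
        have hxk : x ≠ e.1 := fun h => hmem (h ▸ hx)
        have hne : e.1 ≠ x := fun h => hxk h.symm
        simp [beq_iff_eq, hne]
      · simp [valsOf_append, valsOf_not_mem E e.1 hmem]

lemma filter_insertBy (c : String) (x : String × String) (l : List (String × String))
    (hl : l.Pairwise (fun a b => a.1 ≤ b.1)) :
    (PySem.List.insertBy (fun a b => decide (a.1 < b.1)) x l).filter (fun a => a.1 == c)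
      = l.filter (fun a => a.1 == c) ++ (if x.1 == c then [x] else []) := by
  induction l with
  | nil => by_cases h : x.1 == c <;> simp [PySem.List.insertBy, List.filter, h]
  | cons y ys ih =>
    rw [List.pairwise_cons] at hl
    obtain ⟨hy, hys⟩ := hl
    show (if decide (x.1 < y.1) = true then x :: y :: ys else y :: PySem.List.insertBy _ x ys).filter _ = _
    by_cases hlt : x.1 < y.1
    · rw [if_pos (by simpa using hlt)]
      by_cases hx : x.1 = c
      · subst hx
        have hrest : (y :: ys).filter (fun a => a.1 == x.1) = [] := by
          rw [List.filter_eq_nil_iff]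
          intro a ha
          have : y.1 ≤ a.1 := by
            rcases List.mem_cons.mp ha with rfl | ha'
            · exact le_refl _
            · exact hy a ha'
          simp only [beq_iff_eq]
          intro hax
          exact absurd hlt (by rw [hax] at this; exact not_lt.mpr this)
        rw [List.filter_cons_of_pos (by simp), hrest]
        simp
      · have : (x.1 == c) = false := by simpa using hx
        rw [List.filter_cons_of_neg (by simp [this]), this]
        simp
    · rw [if_neg (by simpa using hlt)]
      rw [List.filter_cons, List.filter_cons, ih hys]
      by_cases hyc : y.1 == c <;> simp [hyc]

lemma sorted_filter (E : List (String × String)) (c : String) :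
    (PySem.List.sorted E (fun e => e.1) false).filter (fun e => e.1 == c)
      = E.filter (fun e => e.1 == c) := by
  induction E using List.reverseRecOn with
  | nil => simp [PySem.List.sorted]
  | append_singleton E x ih =>
    have hsort : PySem.List.sorted (E ++ [x]) (fun e => e.1) false
        = PySem.List.insertBy (fun a b => decide (a.1 < b.1)) x (PySem.List.sorted E (fun e => e.1) false) := by
      rw [PySem.List.sorted_eq_foldl_insertBy, PySem.List.sorted_eq_foldl_insertBy, List.foldl_append]
      rfl
    rw [hsort, filter_insertBy c x _ (PySem.List.sorted_pairwise E (fun e => e.1)), ih,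
      List.filter_append]
    congr 1
    by_cases h : x.1 == c <;> simp [List.filter, h]

lemma dedup_sublist {α : Type} [BEq α] (xs : List α) : (PySem.List.dedup xs).Sublist xs := by
  unfold PySem.List.dedup PySem.Set.ofList
  induction xs using List.reverseRecOn with
  | nil => simp [PySem.Set.empty]
  | append_singleton xs x ih =>
    rw [List.foldl_append, List.foldl_cons, List.foldl_nil]
    unfold PySem.Set.add
    split_ifs with h
    · exact ih.trans (List.sublist_append_left xs [x])
    · exact List.Sublist.append ih (List.Sublist.refl [x])

lemma keysOf_pairwise (S : List (String × String)) (h : S.Pairwise (fun a b => a.1 ≤ b.1)) :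
    (keysOf S).Pairwise (· ≤ ·) := by
  have hmap : (S.map Prod.fst).Pairwise (· ≤ ·) := by
    rw [List.pairwise_map]; exact h
  exact hmap.sublist (dedup_sublist _)

lemma groupFold_eq (S : List (String × String)) (h : S.Pairwise (fun a b => a.1 ≤ b.1)) :
    S.foldl bStep [] = groupOf S := by
  induction S using List.reverseRecOn with
  | nil => simp [groupOf, keysOf, PySem.List.dedup, PySem.Set.ofList, PySem.Set.empty]
  | append_singleton S e ih =>
    have hS : S.Pairwise (fun a b => a.1 ≤ b.1) := h.sublist (List.sublist_append_left _ _)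
    have hmax : ∀ a ∈ S, a.1 ≤ e.1 := by
      rw [List.pairwise_append] at h
      exact fun a ha => h.2.2 a ha e (List.mem_singleton_self e)
    rw [List.foldl_append, List.foldl_cons, List.foldl_nil, ih hS]
    rcases hK : keysOf S with _ | ⟨k0, ks⟩
    · -- no keys means S = []
      have hSnil : S = [] := by
        rcases S with _ | ⟨a, as⟩
        · rfl
        · exfalso
          have : a.1 ∈ keysOf (a :: as) := by
            rw [keysOf_mem]; exact List.mem_map_of_mem (List.mem_cons_self)
          rw [hK] at this; exact absurd this (List.not_mem_nil)
      subst hSnil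
      simp [bStep, groupOf, keysOf, valsOf, PySem.List.dedup, PySem.Set.ofList, PySem.Set.empty,
        PySem.Set.add, PySem.Set.contains]
    · -- keysOf S nonempty
      have hKne : keysOf S ≠ [] := by rw [hK]; exact List.cons_ne_nil _ _
      have hlastG : (groupOf S).getLast? = some ((keysOf S).getLast hKne, valsOf S ((keysOf S).getLast hKne)) := by
        unfold groupOf
        rw [List.getLast?_map, List.getLast?_eq_some_getLast hKne]
        rfl
      have hdecomp : keysOf S = (keysOf S).dropLast ++ [(keysOf S).getLast hKne] :=
        (List.dropLast_append_getLast hKne).symm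
      generalize hKLdef : (keysOf S).getLast hKne = KL at hlastG hdecomp
      have hmaxK : ∀ x ∈ keysOf S, x ≤ KL := by
        intro x hx
        have hp := keysOf_pairwise S hS
        rw [hdecomp] at hp hx
        rw [List.pairwise_append] at hp
        rcases List.mem_append.mp hx with hx' | hx'
        · exact hp.2.2 x hx' _ (List.mem_singleton_self _)
        · rw [List.mem_singleton.mp hx']
      have hKLmem : KL ∈ keysOf S := by rw [hdecomp]; exact List.mem_append_right _ (List.mem_singleton_self _)
      by_cases hcase : e.1 = KL
      · -- run continues
        have hKmem : e.1 ∈ keysOf S := by rw [hcase]; exact hKLmem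
        rw [bStep, hlastG]
        dsimp only
        rw [if_pos (by simpa using hcase.symm)]
        unfold groupOf
        rw [keysOf_append, if_pos hKmem]
        conv_lhs => rw [hdecomp]
        rw [List.map_append, List.map_singleton, List.dropLast_concat]
        conv_rhs => rw [hdecomp]
        rw [List.map_append]
        congr 1
        · apply List.map_congr_left
          intro x hx
          have hxne : x ≠ KL := by
            have hnd := keysOf_nodup S
            rw [hdecomp, List.nodup_append] at hnd
            intro hcontr
            exact hnd.2.2 x hx KL (List.mem_singleton_self _) hcontr
          rw [valsOf_append]
          have hb : (e.1 == x) = false := by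
            simp only [beq_eq_false_iff_ne, ne_eq]
            rw [hcase]; exact fun hh => hxne hh.symm
          simp [hb]
        · rw [List.map_singleton, valsOf_append, ← hcase]
          simp
      · -- new run
        have hKnotmem : e.1 ∉ keysOf S := by
          intro hmem
          have h1 : e.1 ≤ KL := hmaxK _ hmem
          have h2 : KL ≤ e.1 := by
            have hm := hKLmem
            rw [keysOf_mem] at hm
            obtain ⟨a, ha, hfst⟩ := List.mem_map.mp hm
            exact hfst ▸ hmax a ha
          exact hcase (le_antisymm h1 h2)
        rw [bStep, hlastG]
        dsimp only
        rw [if_neg (by simpa using fun hh : KL = e.1 => hcase hh.symm)]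
        unfold groupOf
        rw [keysOf_append, if_neg hKnotmem, List.map_append]
        congr 1
        · apply List.map_congr_left
          intro x hx
          have hxne : (e.1 == x) = false := by
            simp only [beq_eq_false_iff_ne, ne_eq]
            exact fun hh => hKnotmem (hh ▸ hx)
          rw [valsOf_append]
          simp [hxne]
        · rw [List.map_singleton, valsOf_append]
          rw [valsOf_not_mem S e.1 hKnotmem]
          simp

lemma ofList_items (R : List (String × List String)) (h : (R.map Prod.fst).Nodup) :
    (PySem.Dict.ofList R).items = R := by
  induction R using List.reverseRecOn with
  | nil => rfl
  | append_singleton R p ih =>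
    rw [List.map_append, List.nodup_append] at h
    have hR := ih h.1
    have hnot : p.1 ∉ R.map Prod.fst := by
      intro hmem
      exact h.2.2 p.1 hmem p.1 (by simp) rfl
    have hstep : PySem.Dict.ofList (R ++ [p]) = (PySem.Dict.ofList R).insert p.1 p.2 := by
      unfold PySem.Dict.ofList PySem.Dict.update
      rw [List.foldl_append]
      rfl
    have hcont : (PySem.Dict.ofList R).contains p.1 = false := by
      unfold PySem.Dict.contains
      rw [hR, List.any_eq_false]
      intro q hq
      simp only [beq_iff_eq]
      exact fun hh => hnot (hh ▸ List.mem_map_of_mem hq)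
    rw [hstep]
    unfold PySem.Dict.insert
    rw [hcont]
    simp only [Bool.false_eq_true, if_false]
    show (PySem.Dict.ofList R).items ++ [(p.1, p.2)] = R ++ [p]
    rw [hR]

lemma sorted_groupOf (E : List (String × String)) :
    PySem.List.sorted (groupOf E) (fun p => p.1) false
      = groupOf (PySem.List.sorted E (fun e => e.1) false) := by
  set S := PySem.List.sorted E (fun e => e.1) false with hSdef
  have hperm : S.Perm E := PySem.List.sorted_perm _ _ _
  have hvals : ∀ x, valsOf S x = valsOf E x := by
    intro x
    unfold valsOf
    rw [hSdef, sorted_filter]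
  have hkmem : ∀ x, x ∈ keysOf S ↔ x ∈ keysOf E := by
    intro x
    rw [keysOf_mem, keysOf_mem]
    exact ⟨fun hx => (hperm.map Prod.fst).mem_iff.mp hx, fun hx => (hperm.map Prod.fst).mem_iff.mpr hx⟩
  have hkperm : (keysOf S).Perm (keysOf E) :=
    (List.perm_ext_iff_of_nodup (keysOf_nodup _) (keysOf_nodup _)).mpr hkmem
  apply PySem.List.sorted_eq_of_perm_of_pairwise_lt
  · -- groupOf S is a permutation of groupOf E
    unfold groupOf
    have : (keysOf S).map (fun x => (x, valsOf S x)) = (keysOf S).map (fun x => (x, valsOf E x)) := by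
      apply List.map_congr_left
      intro x _
      rw [hvals]
    rw [this]
    exact hkperm.map _
  · -- strictly increasing keys
    have hle : (keysOf S).Pairwise (· ≤ ·) := keysOf_pairwise S (PySem.List.sorted_pairwise E _)
    have hnd : (keysOf S).Nodup := keysOf_nodup S
    have hlt : (keysOf S).Pairwise (· < ·) := by
      have := hle.and hnd
      exact this.imp (fun h => lt_of_le_of_ne h.1 h.2)
    unfold groupOf
    rw [List.pairwise_map]
    exact hlt.imp (fun h => h)

lemma foldl_append_map {α β : Type} (f : α → β) (l : List α) (acc : List β) :
    l.foldl (fun s i => s ++ [f i]) acc = acc ++ l.map f := by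
  induction l generalizing acc with
  | nil => simp
  | cons x xs ih => simp [ih, List.map_cons]

lemma nodes_eq (Text : String) (k : Int) :
    StringComposition Text (k - 1)
      = (PySem.List.pyRange 0 (PySem.Str.len Text - k + 2) 1).map
          (fun i => PySem.Str.slice Text (some i) (some (i + k - 1))) := by
  unfold StringComposition
  rw [foldl_append_map, List.nil_append]
  have hb : PySem.Str.len Text - (k - 1) + 1 = PySem.Str.len Text - k + 2 := by ring
  rw [hb]
  apply List.map_congr_left
  intro i _
  have : i + (k - 1) = i + k - 1 := by ring
  rw [this]

-- ===== VERDICT (by name: the statement is the Claim_ definition above) =====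
theorem deBruijnAdjacency_spec : Claim_equal_deBruijnAdjacency := by
  intro Text k _
  show deBruijnAdjacency Text k = deBruijnAdjacency_alt Text k
  unfold deBruijnAdjacency deBruijnAdjacency_alt
  rw [← nodes_eq Text k]
  set nodes := StringComposition Text (k - 1) with hnodes
  simp only []
  rw [PySem.List.slice_from_one]
  have hdrop1 : nodes.tail = nodes.drop 1 := (List.drop_one).symm
  -- A's loop is the per-edge dict fold
  have hA : deBruijnLoopA nodes (PySem.List.pyRange 0 (nodes.length : Int) 1) PySem.Dict.empty
      = (nodes.zip nodes.tail).foldl stepD PySem.Dict.empty := by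
    have := loopA_eq nodes nodes.length 0 PySem.Dict.empty (by omega)
    simpa using this
  rw [hA, foldD_items, sorted_groupOf]
  set E := nodes.zip nodes.tail with hE
  set S := PySem.List.sorted E (fun e => e.1) false with hS
  rw [groupFold_eq S (PySem.List.sorted_pairwise E _)]
  rw [ofList_items]
  have : (groupOf S).map Prod.fst = keysOf S := by
    unfold groupOf
    rw [List.map_map]
    exact List.map_id _
  rw [this]
  exact keysOf_nodup S
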